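-- pv_equiv track=rewrite | github.com/jensenerik/aoc2024 | solutions/solution22.py | run_two_k
-- ===== SOURCE A (Python) =====
-- from collections import deque
-- from typing import Deque, Dict, Tuple
--
-- def next_secret(x: int) -> int:
--     prune_mod = 16777216
--     x = ((x * 64) ^ x) % prune_mod
--     x = ((x // 32) ^ x) % prune_mod
--     x = ((x * 2048) ^ x) % prune_mod
--     return x
--
-- def run_two_k(input_block: str) -> Tuple[int, int]:
--     running_sum = 0
--     all_scores: Dict[Tuple[int, ...], int] = {}
--     for row in input_block.splitlines():
--         x = int(row)
--         last = None
--         diffs: Deque[int] = deque([], 4)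
--         scores: Dict[Tuple[int, ...], int] = {}
--         for _ in range(2000):
--             x = next_secret(x)
--             price = x % 10
--             if last is not None:
--                 diffs.append(price - last)
--             if len(diffs) == 4 and scores.get(tuple(diffs)) is None:
--                 scores[tuple(diffs)] = price
--             last = price
--         running_sum += x
--         for k, v in scores.items():
--             all_scores[k] = all_scores.get(k, 0) + v
--     return running_sum, max(all_scores.values())
-- ===== SOURCE B (Python) =====
-- def next_secret(x: int) -> int:
--     prune_mod = 16777216
--     x = ((x * 64) ^ x) % prune_mod
--     x = ((x // 32) ^ x) % prune_mod
--     x = ((x * 2048) ^ x) % prune_mod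
--     return x
--
-- def run_two_k(input_block):
--     running_sum = 0
--     all_scores = {}
--     for row in input_block.splitlines():
--         x = int(row)
--         prices = []
--         for _ in range(2000):
--             x = next_secret(x)
--             prices.append(x % 10)
--         running_sum += x
--         diffs = [b - a for a, b in zip(prices, prices[1:])]
--         scores = {}
--         for i in range(len(diffs) - 3):
--             key = tuple(diffs[i:i + 4])
--             if key not in scores:
--                 scores[key] = prices[i + 4]
--         for k, v in scores.items():
--             all_scores[k] = all_scores.get(k, 0) + v
--     return running_sum, max(all_scores.values())
-- ===== Notes on version B (the rewrite author's own statement) =====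
-- stated objective: simpler
-- what changed: A's fused per-buyer loop (PRNG step, deque(maxlen=4) of diffs and first-seen dict update interleaved with a previous-price sentinel) is split into three plain passes: generate the 2000 prices, take adjacent differences with zip, then scan the windows by index inserting first-seen keys.
import Mathlib
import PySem

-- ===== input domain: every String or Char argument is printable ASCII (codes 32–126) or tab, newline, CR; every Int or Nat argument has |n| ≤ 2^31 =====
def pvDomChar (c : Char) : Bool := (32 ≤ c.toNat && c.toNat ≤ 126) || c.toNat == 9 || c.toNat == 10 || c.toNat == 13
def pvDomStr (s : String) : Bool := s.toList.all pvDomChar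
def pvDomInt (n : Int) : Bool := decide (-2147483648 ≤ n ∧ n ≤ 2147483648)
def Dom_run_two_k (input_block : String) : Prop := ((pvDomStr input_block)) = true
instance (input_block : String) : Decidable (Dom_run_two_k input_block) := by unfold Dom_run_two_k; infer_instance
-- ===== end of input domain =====

-- B restates A's fused deque-and-dict PRNG loop as three plain passes (generate all prices, adjacent diffs, window scan); return value only, same result.

-- ===== PORT A =====
def next_secret (x : Int) : Int :=
  let prune_mod : Int := 16777216
  let x1 := PySem.Int.mod (PySem.Int.bxor (x * 64) x) prune_mod
  let x2 := PySem.Int.mod (PySem.Int.bxor (PySem.Int.floordiv x1 32) x1) prune_mod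
  PySem.Int.mod (PySem.Int.bxor (x2 * 2048) x2) prune_mod

-- one iteration of A's inner `for _ in range(2000)` loop; the deque(maxlen=4) is the
-- List kept exact by hand: append on the right, drop on the left when longer than 4
def pvAStep (s : Int × Option Int × List Int × PySem.Dict (List Int) Int) (_ : Nat) :
    Int × Option Int × List Int × PySem.Dict (List Int) Int :=
  let x := next_secret s.1
  let price := PySem.Int.mod x 10
  let diffs :=
    match s.2.1 with
    | none => s.2.2.1
    | some last =>
      let d := s.2.2.1 ++ [price - last]
      if d.length > 4 then d.drop 1 else d
  let scores :=
    if diffs.length == 4 && ((s.2.2.2).get? diffs).isNone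
    then (s.2.2.2).insert diffs price
    else s.2.2.2
  (x, some price, diffs, scores)

-- one iteration of A's outer `for row in input_block.splitlines()` loop
def pvARow (acc : Int × PySem.Dict (List Int) Int) (row : String) :
    Int × PySem.Dict (List Int) Int :=
  let x0 := (PySem.Int.ofStr? row).getD 0   -- none = ValueError; excluded by Pre_
  let st := (List.range 2000).foldl pvAStep (x0, none, [], PySem.Dict.empty)
  let all := st.2.2.2.items.foldl
    (fun a kv => a.insert kv.1 (a.getD kv.1 0 + kv.2)) acc.2
  (acc.1 + st.1, all)

def run_two_k (input_block : String) : Int × Int :=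
  let fin := (PySem.Str.splitlines input_block).foldl pvARow (0, PySem.Dict.empty)
  -- max() of an empty dict's values is a ValueError; excluded by Pre_
  (fin.1, (PySem.List.max? fin.2.values (fun v => v)).getD 0)

-- ===== PORT B =====
def next_secret_alt (x : Int) : Int :=
  let prune_mod : Int := 16777216
  let x1 := PySem.Int.mod (PySem.Int.bxor (x * 64) x) prune_mod
  let x2 := PySem.Int.mod (PySem.Int.bxor (PySem.Int.floordiv x1 32) x1) prune_mod
  PySem.Int.mod (PySem.Int.bxor (x2 * 2048) x2) prune_mod

-- one iteration of B's price-generating loop: `x = next_secret(x); prices.append(x % 10)`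
def pvBGenStep (s : Int × List Int) (_ : Nat) : Int × List Int :=
  let x := next_secret_alt s.1
  (x, s.2 ++ [PySem.Int.mod x 10])

-- one iteration of B's outer `for row in input_block.splitlines()` loop
def pvBRow (acc : Int × PySem.Dict (List Int) Int) (row : String) :
    Int × PySem.Dict (List Int) Int :=
  let x0 := (PySem.Int.ofStr? row).getD 0   -- none = ValueError; excluded by Pre_
  let g := (List.range 2000).foldl pvBGenStep (x0, [])
  let prices := g.2
  let diffs := (List.zip prices (PySem.List.slice prices (some 1) none)).map (fun ab => ab.2 - ab.1)
  let scores := (PySem.List.pyRange 0 ((diffs.length : Int) - 3) 1).foldl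
    (fun sc i =>
      if sc.contains (PySem.List.slice diffs (some i) (some (i + 4))) then sc
      else sc.insert (PySem.List.slice diffs (some i) (some (i + 4)))
             (PySem.List.pyGetD prices (i + 4) 0))
    PySem.Dict.empty
  let all := scores.items.foldl
    (fun a kv => a.insert kv.1 (a.getD kv.1 0 + kv.2)) acc.2
  (acc.1 + g.1, all)

def run_two_k_alt (input_block : String) : Int × Int :=
  let fin := (PySem.Str.splitlines input_block).foldl pvBRow (0, PySem.Dict.empty)
  -- max() of an empty dict's values is a ValueError; excluded by Pre_
  (fin.1, (PySem.List.max? fin.2.values (fun v => v)).getD 0)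

-- ===== PRECONDITION & SPEC =====
-- Pre_ excludes exactly the inputs on which A raises: a line int() rejects (ValueError)
-- and the empty line list, where max() of no values is a ValueError.
def Pre_run_two_k (input_block : String) : Prop :=
  PySem.Str.splitlines input_block ≠ [] ∧
  ∀ row ∈ PySem.Str.splitlines input_block, (PySem.Int.ofStr? row).isSome
instance (input_block : String) : Decidable (Pre_run_two_k input_block) := by
  unfold Pre_run_two_k; infer_instance

def pvWitness_run_two_k : String := "123\n10"

def Spec_run_two_k (input_block : String) (out : Int × Int) : Prop := out = run_two_k_alt input_block
instance (input_block : String) (out : Int × Int) : Decidable (Spec_run_two_k input_block out) := by unfold Spec_run_two_k; infer_instance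

-- ===== CLAIM (what is proved, stated in full; the proofs are below) =====
def Claim_equal_run_two_k : Prop := ∀ (input_block : String), Dom_run_two_k input_block → Pre_run_two_k input_block → Spec_run_two_k input_block (run_two_k input_block)

-- ===== LEMMAS AND PROOFS =====

-- adjacent differences of the price list (proof-side characterisation of B's `diffs`)
def pvDiffsOf : List Int → List Int
  | [] => []
  | [_] => []
  | a :: b :: t => (b - a) :: pvDiffsOf (b :: t)

-- proof-side characterisation of the per-row scores dict: first-seen 4-diff windows
def pvWinScores (d p : List Int) : PySem.Dict (List Int) Int :=
  (List.range (d.length - 3)).foldl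
    (fun sc i =>
      if sc.contains ((d.drop i).take 4) then sc
      else sc.insert ((d.drop i).take 4) (p.getD (i + 4) 0))
    PySem.Dict.empty

-- A's inner-loop state as a function of B's generator state
def pvAbs (g : Int × List Int) : Int × Option Int × List Int × PySem.Dict (List Int) Int :=
  (g.1, g.2.getLast?, (pvDiffsOf g.2).drop ((pvDiffsOf g.2).length - 4),
   pvWinScores (pvDiffsOf g.2) g.2)

lemma pvDiffsOf_length (p : List Int) : (pvDiffsOf p).length = p.length - 1 := by
  induction p using pvDiffsOf.induct with
  | case1 => simp [pvDiffsOf]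
  | case2 a => simp [pvDiffsOf]
  | case3 a b t ih => simp [pvDiffsOf] at ih ⊢; omega

lemma pvDiffsOf_concat (p : List Int) (l q : Int) (h : p.getLast? = some l) :
    pvDiffsOf (p ++ [q]) = pvDiffsOf p ++ [q - l] := by
  induction p using pvDiffsOf.induct with
  | case1 => simp at h
  | case2 a => simp at h; subst h; simp [pvDiffsOf]
  | case3 a b t ih =>
    rw [List.getLast?_cons_cons] at h
    simp only [List.cons_append, pvDiffsOf]
    rw [show b :: (t ++ [q]) = (b :: t) ++ [q] from rfl, ih h]

lemma pvDiffsOf_eq_zip (p : List Int) :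
    (List.zip p (p.drop 1)).map (fun ab => ab.2 - ab.1) = pvDiffsOf p := by
  induction p using pvDiffsOf.induct with
  | case1 => simp [pvDiffsOf]
  | case2 a => simp [pvDiffsOf]
  | case3 a b t ih => simpa [pvDiffsOf] using ih

lemma pvDequeStep (l : List Int) (a : Int) :
    (if (l.drop (l.length - 4) ++ [a]).length > 4
     then (l.drop (l.length - 4) ++ [a]).drop 1
     else l.drop (l.length - 4) ++ [a])
    = (l ++ [a]).drop ((l ++ [a]).length - 4) := by
  by_cases h : 4 ≤ l.length
  · have h5 : (l.drop (l.length - 4) ++ [a]).length > 4 := by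
      simp only [List.length_append, List.length_drop, List.length_cons, List.length_nil,
        gt_iff_lt]; omega
    have e1 : (l ++ [a]).length - 4 = l.length - 3 := by
      simp only [List.length_append, List.length_cons, List.length_nil]; omega
    rw [if_pos h5, e1]
    rw [List.drop_append_of_le_length (show 1 ≤ (l.drop (l.length - 4)).length by
      simp only [List.length_drop]; omega)]
    rw [List.drop_drop]
    rw [List.drop_append_of_le_length (show l.length - 3 ≤ l.length by omega)]
    congr 2
    omega
  · have h5 : ¬ (l.drop (l.length - 4) ++ [a]).length > 4 := by
      simp only [List.length_append, List.length_drop, List.length_cons, List.length_nil,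
        gt_iff_lt, not_lt]; omega
    have e0 : l.length - 4 = 0 := by omega
    have e2 : (l ++ [a]).length - 4 = 0 := by
      simp only [List.length_append, List.length_cons, List.length_nil]; omega
    rw [if_neg h5, e0, e2]
    simp

lemma pvWinStep (d p : List Int) (nd q : Int) (hlen : p.length = d.length + 1) :
    pvWinScores (d ++ [nd]) (p ++ [q])
    = (if ((d ++ [nd]).drop ((d ++ [nd]).length - 4)).length == 4
           && ((pvWinScores d p).get? ((d ++ [nd]).drop ((d ++ [nd]).length - 4))).isNone
       then (pvWinScores d p).insert ((d ++ [nd]).drop ((d ++ [nd]).length - 4)) q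
       else pvWinScores d p) := by
  by_cases h3 : 3 ≤ d.length
  · have key4 : (d ++ [nd]).drop ((d ++ [nd]).length - 4) = d.drop (d.length - 3) ++ [nd] := by
      rw [show (d ++ [nd]).length - 4 = d.length - 3 by
        simp only [List.length_append, List.length_cons, List.length_nil]; omega]
      rw [List.drop_append_of_le_length (by omega)]
    have klen : (d.drop (d.length - 3) ++ [nd]).length = 4 := by
      simp only [List.length_append, List.length_drop, List.length_cons, List.length_nil]; omega
    have hr : (d ++ [nd]).length - 3 = (d.length - 3) + 1 := by
      simp only [List.length_append, List.length_cons, List.length_nil]; omega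
    have hold :
        (List.range (d.length - 3)).foldl
          (fun (sc : PySem.Dict (List Int) Int) (i : Nat) =>
            if sc.contains (((d ++ [nd]).drop i).take 4) then sc
            else sc.insert (((d ++ [nd]).drop i).take 4) ((p ++ [q]).getD (i + 4) 0))
          PySem.Dict.empty
        = (List.range (d.length - 3)).foldl
          (fun (sc : PySem.Dict (List Int) Int) (i : Nat) =>
            if sc.contains ((d.drop i).take 4) then sc
            else sc.insert ((d.drop i).take 4) (p.getD (i + 4) 0))
          PySem.Dict.empty := by
      apply PySem.List.foldl_congr_mem
      intro acc i hi
      have hi' : i < d.length - 3 := List.mem_range.mp hi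
      have e1 : ((d ++ [nd]).drop i).take 4 = (d.drop i).take 4 := by
        rw [List.drop_append_of_le_length (by omega),
            List.take_append_of_le_length (by simp only [List.length_drop]; omega)]
      have e2 : (p ++ [q]).getD (i + 4) 0 = p.getD (i + 4) 0 := by
        rw [List.getD_append _ _ _ _ (by omega)]
      rw [e1, e2]
    unfold pvWinScores
    rw [hr, List.range_succ, List.foldl_append, hold]
    simp only [List.foldl_cons, List.foldl_nil]
    rw [key4]
    have e3 : ((d ++ [nd]).drop (d.length - 3)).take 4 = d.drop (d.length - 3) ++ [nd] := by
      rw [List.drop_append_of_le_length (by omega)]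
      exact List.take_of_length_le (by omega)
    have e4 : (p ++ [q]).getD (d.length - 3 + 4) 0 = q := by
      have h : d.length - 3 + 4 = p.length := by omega
      rw [h]
      simp [List.getD]
    rw [e3, e4, klen]
    rw [PySem.Dict.contains_eq_isSome_get?]
    cases hg : (List.foldl
          (fun (sc : PySem.Dict (List Int) Int) (i : Nat) =>
            if sc.contains ((d.drop i).take 4) then sc
            else sc.insert ((d.drop i).take 4) (p.getD (i + 4) 0))
          PySem.Dict.empty (List.range (d.length - 3))).get? (d.drop (d.length - 3) ++ [nd]) with
    | none => simp
    | some v => simp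
  · have e0 : d.length - 3 = 0 := by omega
    have e1 : (d ++ [nd]).length - 3 = 0 := by
      simp only [List.length_append, List.length_cons, List.length_nil]; omega
    unfold pvWinScores
    rw [e0, e1]
    simp only [List.range_zero, List.foldl_nil]
    rw [if_neg]
    simp only [Bool.and_eq_true, beq_iff_eq, List.length_drop, List.length_append,
      List.length_cons, List.length_nil, not_and]
    intro h4
    omega

lemma pvNext_eq : next_secret_alt = next_secret := rfl

lemma pvStepAbs (x : Int) (p : List Int) (k : Nat) :
    pvAStep (pvAbs (x, p)) k = pvAbs (pvBGenStep (x, p) k) := by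
  rcases eq_or_ne p [] with rfl | hp
  · simp [pvAStep, pvAbs, pvBGenStep, pvWinScores, pvDiffsOf, pvNext_eq]
  · have hl : ∃ l, p.getLast? = some l := by
      cases hpl : p.getLast? with
      | none => exact absurd (List.getLast?_eq_none_iff.mp hpl) hp
      | some l => exact ⟨l, rfl⟩
    obtain ⟨l, hl⟩ := hl
    have hlen : p.length = (pvDiffsOf p).length + 1 := by
      have h1 := pvDiffsOf_length p
      have h2 : 0 < p.length := List.length_pos_of_ne_nil hp
      omega
    simp only [pvAStep, pvAbs, pvBGenStep, hl, pvNext_eq]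
    refine Prod.ext rfl (Prod.ext ?_ (Prod.ext ?_ ?_)) <;> simp only []
    · exact (List.getLast?_concat).symm
    · rw [pvDiffsOf_concat p l _ hl]
      exact pvDequeStep _ _
    · rw [pvDiffsOf_concat p l _ hl, pvDequeStep]
      exact (pvWinStep (pvDiffsOf p) p _ _ (by omega)).symm

lemma pvInv (x0 : Int) (n : Nat) :
    (List.range n).foldl pvAStep (x0, none, [], PySem.Dict.empty)
    = pvAbs ((List.range n).foldl pvBGenStep (x0, [])) := by
  induction n with
  | zero => rfl
  | succ n ih =>
    simp only [List.range_succ, List.foldl_append, List.foldl_cons, List.foldl_nil, ih]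
    exact pvStepAbs _ _ n

lemma pvWinB (d p : List Int) :
    (PySem.List.pyRange 0 ((d.length : Int) - 3) 1).foldl
      (fun sc i =>
        if sc.contains (PySem.List.slice d (some i) (some (i + 4))) then sc
        else sc.insert (PySem.List.slice d (some i) (some (i + 4)))
               (PySem.List.pyGetD p (i + 4) 0))
      PySem.Dict.empty
    = pvWinScores d p := by
  rw [PySem.List.pyRange_one]
  rw [show ((d.length : Int) - 3 - 0).toNat = d.length - 3 by omega]
  rw [List.foldl_map]
  apply PySem.List.foldl_congr_mem
  intro acc k hk
  have e1 : PySem.List.slice d (some (0 + (k : Int))) (some (0 + (k : Int) + 4))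
      = (d.drop k).take 4 := by
    rw [zero_add, show ((k : Int) + 4) = (k : Int) + ((4 : Nat) : Int) by norm_num]
    rw [PySem.List.slice_natCast_add]
  have e2 : PySem.List.pyGetD p (0 + (k : Int) + 4) 0 = p.getD (k + 4) 0 := by
    rw [zero_add, show ((k : Int) + 4) = ((k + 4 : Nat) : Int) by push_cast; ring]
    rw [PySem.List.pyGetD_natCast]
  rw [e1, e2]

lemma pvRow_eq : pvARow = pvBRow := by
  funext acc row
  simp only [pvARow, pvBRow, pvInv]
  rw [PySem.List.slice_from_one, ← List.drop_one, pvDiffsOf_eq_zip, pvWinB]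
  simp only [pvAbs]

lemma pvMain (input_block : String) : run_two_k input_block = run_two_k_alt input_block := by
  simp [run_two_k, run_two_k_alt, pvRow_eq]

-- ===== VERDICT (by name: the statement is the Claim_ definition above) =====
theorem run_two_k_spec : Claim_equal_run_two_k := by
  intro input_block _ _
  exact pvMain input_block
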